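-- pv_equiv track=rewrite | github.com/wowJasonCorderoy/gs_load_yield_tree | yield_trees_BQ.py | clean_primal_code
-- ===== SOURCE A (Python) =====
-- def clean_primal_code(primal_code):
--
--     original_code = primal_code
--     # Remove any added '-something' at the end of the code
--     if '-' in primal_code:
--         primal_code = primal_code.split('-')[0]
--
--     # Sometimes numbers are imported as float format, remove the .0
--     if '.' in primal_code:
--         primal_code = primal_code.split('.')[0]
--
--     # Remove any non-numbers
--     numbers = ''
--     for char in primal_code:
--         if char.isdigit():
--             numbers = numbers + char
--     if primal_code != numbers:
--     	primal_code = numbers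
--
--     # If we ended up with no numbers treat the code as nan
--     if primal_code == '':
--         primal_code = 'nan'
--
--     return primal_code
-- ===== SOURCE B (Python) =====
-- def clean_primal_code(primal_code):
--     # Single left-to-right scan: stop at the first '-' or '.', collect digits seen before it.
--     digits = []
--     for ch in primal_code:
--         if ch == '-' or ch == '.':
--             break
--         if ch.isdigit():
--             digits.append(ch)
--     return ''.join(digits) or 'nan'
-- ===== Notes on version B (the rewrite author's own statement) =====
-- stated objective: simpler
-- what changed: Replaces the two conditional split('-')/split('.') passes plus a separate digit-filter loop with a single left-to-right scan that breaks at the first '-' or '.' and collects digits as it goes.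
import Mathlib
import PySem

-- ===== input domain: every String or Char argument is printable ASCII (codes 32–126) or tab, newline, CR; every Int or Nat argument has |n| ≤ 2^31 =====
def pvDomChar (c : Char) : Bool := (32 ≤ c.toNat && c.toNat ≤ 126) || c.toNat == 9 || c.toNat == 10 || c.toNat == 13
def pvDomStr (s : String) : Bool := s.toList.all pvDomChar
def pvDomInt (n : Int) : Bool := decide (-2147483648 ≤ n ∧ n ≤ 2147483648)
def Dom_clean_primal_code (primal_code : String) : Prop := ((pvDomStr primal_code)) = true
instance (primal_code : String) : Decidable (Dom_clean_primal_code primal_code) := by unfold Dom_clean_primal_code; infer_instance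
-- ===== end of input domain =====

-- B replaces A's two split passes + digit-filter loop by one left-to-right scan that stops
-- at the first '-' or '.' and collects digits (objective: simpler, one pass).

-- ===== PORT A =====
-- A, step for step, on the code-point list: two conditional split-truncations,
-- the digit-accumulating loop, the (no-op) reassignment test, and the 'nan' default.
def clean_primal_code (primal_code : String) : String :=
  let pc0 := primal_code.toList
  let pc1 := if PySem.Chars.isIn ['-'] pc0 then (PySem.Chars.splitOn pc0 ['-']).headD [] else pc0
  let pc2 := if PySem.Chars.isIn ['.'] pc1 then (PySem.Chars.splitOn pc1 ['.']).headD [] else pc1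
  let numbers := pc2.foldl (fun acc c => if PySem.Chars.isdigit c then acc ++ [c] else acc) []
  let pc3 := if pc2 ≠ numbers then numbers else pc2
  if pc3 = [] then "nan" else String.ofList pc3

-- ===== PORT B =====
-- B's loop: break at the first '-' or '.', append digits to the accumulator.
def cpcScan : List Char → List Char → List Char
  | acc, [] => acc
  | acc, c :: rest =>
    if c == '-' || c == '.' then acc
    else cpcScan (if PySem.Chars.isdigit c then acc ++ [c] else acc) rest

def clean_primal_code_alt (primal_code : String) : String :=
  let digits := cpcScan [] primal_code.toList
  if digits = [] then "nan" else String.ofList digits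

-- ===== PRECONDITION & SPEC =====
def Spec_clean_primal_code (primal_code : String) (out : String) : Prop := out = clean_primal_code_alt primal_code
instance (primal_code : String) (out : String) : Decidable (Spec_clean_primal_code primal_code out) := by unfold Spec_clean_primal_code; infer_instance

-- ===== CLAIM (what is proved, stated in full; the proofs are below) =====
def Claim_equal_clean_primal_code : Prop := ∀ (primal_code : String), Dom_clean_primal_code primal_code → Spec_clean_primal_code primal_code (clean_primal_code primal_code)

-- ===== LEMMAS AND PROOFS =====

-- splitOn.go prepends acc.reverse to a nonempty list of pieces.
theorem cpc_go_append (sep : List Char) (fuel : Nat) :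
    ∀ (l cur : List Char) (acc : List (List Char)), ∃ ps, ps ≠ [] ∧
      PySem.Chars.splitOn.go sep fuel l cur acc = acc.reverse ++ ps := by
  induction fuel with
  | zero =>
    intro l cur acc
    exact ⟨[cur.reverse ++ l], by simp, by simp [PySem.Chars.splitOn.go]⟩
  | succ n ih =>
    intro l cur acc
    cases l with
    | nil => exact ⟨[cur.reverse], by simp, by simp [PySem.Chars.splitOn.go]⟩
    | cons c rest =>
      by_cases h : sep.isPrefixOf (c :: rest) = true
      · obtain ⟨ps, hne, hgo⟩ := ih (List.drop sep.length (c :: rest)) [] (cur.reverse :: acc)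
        refine ⟨cur.reverse :: ps, by simp, ?_⟩
        simp [PySem.Chars.splitOn.go, h, hgo]
      · obtain ⟨ps, hne, hgo⟩ := ih rest (c :: cur) acc
        refine ⟨ps, hne, ?_⟩
        simp [PySem.Chars.splitOn.go, h, hgo]

-- with acc = [], the first piece is cur.reverse ++ the prefix of l before the first d
theorem cpc_go_head (d : Char) (fuel : Nat) :
    ∀ (l cur : List Char), l.length ≤ fuel →
      (PySem.Chars.splitOn.go [d] fuel l cur []).headD []
        = cur.reverse ++ l.takeWhile (fun c => c != d) := by
  induction fuel with
  | zero =>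
    intro l cur h
    have : l = [] := List.eq_nil_of_length_eq_zero (Nat.le_zero.mp h)
    subst this
    simp [PySem.Chars.splitOn.go]
  | succ n ih =>
    intro l cur h
    cases l with
    | nil => simp [PySem.Chars.splitOn.go]
    | cons c rest =>
      by_cases hc : c = d
      · subst hc
        have hpre : [c].isPrefixOf (c :: rest) = true := by simp [List.isPrefixOf]
        obtain ⟨ps, hne, hgo⟩ :=
          cpc_go_append [c] n (List.drop 1 (c :: rest)) [] [cur.reverse]
        rw [show PySem.Chars.splitOn.go [c] (n + 1) (c :: rest) cur []
              = PySem.Chars.splitOn.go [c] n (List.drop 1 (c :: rest)) [] [cur.reverse] from by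
            simp [PySem.Chars.splitOn.go, hpre], hgo]
        simp [List.takeWhile]
      · have hpre : ([d].isPrefixOf (c :: rest)) = false := by
          simp [List.isPrefixOf]
          exact fun h' => hc h'.symm
        rw [show PySem.Chars.splitOn.go [d] (n + 1) (c :: rest) cur []
              = PySem.Chars.splitOn.go [d] n rest (c :: cur) [] from by
            simp [PySem.Chars.splitOn.go, hpre],
          ih rest (c :: cur) (Nat.le_of_succ_le_succ h)]
        have hcd : (c != d) = true := by simp [hc]
        simp [List.takeWhile, hcd]

theorem cpc_splitOn_head (d : Char) (l : List Char) :
    (PySem.Chars.splitOn l [d]).headD [] = l.takeWhile (fun c => c != d) := by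
  unfold PySem.Chars.splitOn
  simpa using cpc_go_head d (l.length + 1) l [] (Nat.le_succ _)

theorem cpc_isIn_single (d : Char) (l : List Char) :
    PySem.Chars.isIn [d] l = true ↔ d ∈ l := by
  rw [PySem.Chars.isIn_iff_infix]
  constructor
  · intro h
    exact h.sublist.subset (by simp)
  · intro h
    obtain ⟨s, t, rfl⟩ := List.append_of_mem h
    exact ⟨s, t, by simp⟩

-- truncation at the first d, whether or not A takes the split branch
theorem cpc_trunc (d : Char) (l : List Char) :
    (if PySem.Chars.isIn [d] l then (PySem.Chars.splitOn l [d]).headD [] else l)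
      = l.takeWhile (fun c => c != d) := by
  by_cases h : PySem.Chars.isIn [d] l = true
  · rw [if_pos h, cpc_splitOn_head]
  · have hmem : d ∉ l := fun hm => h ((cpc_isIn_single d l).mpr hm)
    rw [if_neg (by simp [h])]
    refine (List.takeWhile_eq_self_iff.mpr ?_).symm
    intro c hc
    simp only [bne_iff_ne, ne_eq]
    exact fun h' => hmem (h' ▸ hc)

theorem cpc_scan_eq (l : List Char) : ∀ acc : List Char,
    cpcScan acc l = acc ++ (l.takeWhile (fun c => !(c == '-' || c == '.'))).filter PySem.Chars.isdigit := by
  induction l with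
  | nil => intro acc; simp [cpcScan]
  | cons c rest ih =>
    intro acc
    by_cases h : (c == '-' || c == '.') = true
    · simp [cpcScan, h, List.takeWhile]
    · simp only [cpcScan, h]
      rw [if_neg (by simp_all)]
      rw [ih]
      simp [List.takeWhile, h, List.filter]
      by_cases hd : PySem.Chars.isdigit c = true <;> simp [hd]

theorem cpc_main (l : List Char) :
    (l.takeWhile (fun c => c != '-')).takeWhile (fun c => c != '.')
      = l.takeWhile (fun c => !(c == '-' || c == '.')) := by
  rw [List.takeWhile_takeWhile]
  congr 1
  funext c
  by_cases h1 : c = '-' <;> by_cases h2 : c = '.' <;> simp [h1, h2]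

theorem cpc_collapse (m n : List Char) : (if m ≠ n then n else m) = n := by
  by_cases h : m = n <;> simp [h]

-- ===== VERDICT (by name: the statement is the Claim_ definition above) =====
theorem clean_primal_code_spec : Claim_equal_clean_primal_code := by
  intro s _
  unfold Spec_clean_primal_code
  show clean_primal_code s = clean_primal_code_alt s
  simp only [clean_primal_code, clean_primal_code_alt]
  rw [cpc_trunc, cpc_trunc, cpc_main, PySem.List.foldl_append_if_eq_filter, cpc_scan_eq]
  simp only [List.nil_append]
  rw [cpc_collapse]
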